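-- pv_equiv track=rewrite | github.com/NicksName290/Nicks_Yatch-Dice2 | funcoes.py | calcula_pontos_quadra
-- ===== SOURCE A (Python) =====
-- def calcula_pontos_quadra(l):
--    soma = 0
--    sim = False
--    for i in l:
--       soma += i
--       if l.count(i) >= 4:
--         sim = True
--    if sim == True :
--       return soma
--    return 0
-- ===== SOURCE B (Python) =====
-- def calcula_pontos_quadra(l):
--     s = sorted(l)
--     if any(s[j] == s[j + 3] for j in range(len(s) - 3)):
--         return sum(l)
--     return 0
-- ===== Notes on version B (the rewrite author's own statement) =====
-- stated objective: faster
-- what changed: Instead of rescanning l with l.count(i) for every element, B sorts a copy once and detects a value with >=4 occurrences by checking whether any sorted window satisfies s[j] == s[j+3] (equal elements are contiguous after sorting), then returns sum(l) or 0.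
import Mathlib
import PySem

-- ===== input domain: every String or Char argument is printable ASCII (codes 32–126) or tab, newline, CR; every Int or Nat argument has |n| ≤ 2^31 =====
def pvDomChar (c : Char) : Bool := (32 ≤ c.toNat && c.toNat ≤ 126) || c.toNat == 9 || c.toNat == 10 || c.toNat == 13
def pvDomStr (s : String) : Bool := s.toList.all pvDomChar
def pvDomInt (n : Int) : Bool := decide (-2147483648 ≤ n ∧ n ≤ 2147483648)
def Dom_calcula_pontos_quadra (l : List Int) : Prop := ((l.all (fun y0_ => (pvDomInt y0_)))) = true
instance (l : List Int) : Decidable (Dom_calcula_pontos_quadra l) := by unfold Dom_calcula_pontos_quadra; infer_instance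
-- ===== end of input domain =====

-- B sorts a copy once and detects a value occurring ≥ 4 times via a sorted window s[j] == s[j+3],
-- replacing A's per-element l.count(i) rescans (objective: faster).

-- ===== PORT A =====
-- loop state (soma, sim); l.count(i) = PySem.List.count l i
def calcula_pontos_quadra (l : List Int) : Int :=
  let st := l.foldl
    (fun (st : Int × Bool) i =>
      (st.1 + i, if 4 ≤ PySem.List.count l i then true else st.2))
    (0, false)
  if st.2 = true then st.1 else 0

-- ===== PORT B =====
-- s = sorted(l); any(s[j] == s[j+3] for j in range(len(s)-3)); sum(l) or 0
def calcula_pontos_quadra_alt (l : List Int) : Int :=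
  let s := PySem.List.sorted l (fun x => x) false
  if (PySem.List.pyRange 0 ((s.length : Int) - 3) 1).any
       (fun j => PySem.List.pyGetD s j 0 == PySem.List.pyGetD s (j + 3) 0)
  then l.sum else 0

-- ===== PRECONDITION & SPEC =====
def Spec_calcula_pontos_quadra (l : List Int) (out : Int) : Prop := out = calcula_pontos_quadra_alt l
instance (l : List Int) (out : Int) : Decidable (Spec_calcula_pontos_quadra l out) := by unfold Spec_calcula_pontos_quadra; infer_instance

-- ===== CLAIM (what is proved, stated in full; the proofs are below) =====
def Claim_equal_calcula_pontos_quadra : Prop := ∀ (l : List Int), Dom_calcula_pontos_quadra l → Spec_calcula_pontos_quadra l (calcula_pontos_quadra l)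

-- ===== LEMMAS AND PROOFS =====

-- A's loop computes the running sum and the 'some element has count ≥ 4' flag
theorem pv_loopA (l rest : List Int) (a : Int) (b : Bool) :
    rest.foldl
      (fun (st : Int × Bool) i =>
        (st.1 + i, if 4 ≤ PySem.List.count l i then true else st.2)) (a, b)
    = (a + rest.sum, b || rest.any (fun i => 4 ≤ PySem.List.count l i)) := by
  induction rest generalizing a b with
  | nil => simp
  | cons x xs ih =>
      simp only [List.foldl_cons, List.sum_cons, List.any_cons, ih]
      refine Prod.ext ?_ ?_
      · ring
      · split_ifs with h <;> rw [PySem.List.count_eq] at h <;> simp [h]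

-- the '= x' part of the '< x / = x / > x' split of a list
theorem pv_filter_eq_replicate (l : List Int) (x : Int) :
    (l.filter (fun y => !decide (y < x))).filter (fun y => y == x)
        = List.replicate (l.count x) x := by
  rw [List.filter_filter]
  rw [show (l.filter fun a => (a == x) && !decide (a < x)) = l.filter (· == x) from
    List.filter_congr (by intro a _; by_cases h : a = x <;> simp [h])]
  exact List.filter_beq (l := l) (a := x)

-- the '> x' part of the split
theorem pv_filter_gt (l : List Int) (x : Int) :
    (l.filter (fun y => !decide (y < x))).filter (fun y => !(y == x))
        = l.filter (fun y => x < y) := by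
  rw [List.filter_filter]
  refine List.filter_congr ?_
  intro a _
  have e1 : (!(a == x)) = decide (a ≠ x) := by
    rw [Bool.eq_iff_iff]; simp
  have e2 : (!decide (a < x)) = decide (¬ a < x) := by
    rw [decide_not]
  rw [e1, e2, ← Bool.decide_and]
  exact decide_eq_decide.mpr (by omega)

-- a sorted list splits as  sorted-smaller ++ replicate (count x) x ++ sorted-larger
theorem pv_sorted_decomp (l : List Int) (x : Int) :
    PySem.List.sorted l (fun x => x) false
      = PySem.List.sorted (l.filter (fun y => y < x)) (fun x => x) false
        ++ List.replicate (l.count x) x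
        ++ PySem.List.sorted (l.filter (fun y => x < y)) (fun x => x) false := by
  set u := PySem.List.sorted (l.filter (fun y => y < x)) (fun x => x) false with hu
  set v := PySem.List.sorted (l.filter (fun y => x < y)) (fun x => x) false with hv
  have h1 : (l.filter (fun y => decide (y < x)) ++
      (l.filter (fun y => !decide (y < x)))).Perm l := List.filter_append_perm _ l
  have h2 : (List.replicate (l.count x) x ++ l.filter (fun y => x < y)).Perm
      (l.filter (fun y => !decide (y < x))) := by
    have := List.filter_append_perm (fun y => y == x) (l.filter (fun y => !decide (y < x)))
    rwa [pv_filter_eq_replicate, pv_filter_gt] at this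
  have hperm : (u ++ List.replicate (l.count x) x ++ v).Perm l := by
    rw [List.append_assoc]
    refine List.Perm.trans ?_ h1
    refine List.Perm.append (PySem.List.sorted_perm _ _ _) ?_
    exact List.Perm.trans (List.Perm.append_left _ (PySem.List.sorted_perm _ _ _)) h2
  have hpw : (u ++ List.replicate (l.count x) x ++ v).Pairwise (· ≤ ·) := by
    rw [List.append_assoc, List.pairwise_append]
    refine ⟨by simpa using PySem.List.sorted_pairwise (l.filter (fun y => y < x)) (fun x => x), ?_, ?_⟩
    · rw [List.pairwise_append]
      refine ⟨by simp [List.pairwise_replicate],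
        by simpa using PySem.List.sorted_pairwise (l.filter (fun y => x < y)) (fun x => x), ?_⟩
      intro a ha b hb
      have hax : a = x := List.eq_of_mem_replicate ha
      have hbx : x < b := by
        rw [hv, PySem.List.mem_sorted] at hb
        simpa using (List.mem_filter.mp hb).2
      omega
    · intro a ha b hb
      have hax : a < x := by
        rw [hu, PySem.List.mem_sorted] at ha
        simpa using (List.mem_filter.mp ha).2
      rcases List.mem_append.mp hb with hb | hb
      · have := List.eq_of_mem_replicate hb; omega
      · have : x < b := by
          rw [hv, PySem.List.mem_sorted] at hb
          simpa using (List.mem_filter.mp hb).2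
        omega
  exact PySem.List.sorted_id_eq_of_perm_of_pairwise _ _ hperm hpw

-- forward: a sorted window s[j] = s[j+3] forces four equal consecutive elements, hence count ≥ 4
theorem pv_window_to_count (l : List Int) (j : ℕ)
    (hj : j + 3 < (PySem.List.sorted l (fun x => x) false).length)
    (he : (PySem.List.sorted l (fun x => x) false)[j]'(by omega) =
          (PySem.List.sorted l (fun x => x) false)[j + 3]) :
    ∃ x ∈ l, 4 ≤ List.count x l := by
  set s := PySem.List.sorted l (fun x => x) false with hs
  have he' : s[j]'(by omega) = s[j+3]'(by omega) := he
  set x := s[j]'(by omega) with hx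
  have m1 : s[j]'(by omega) ≤ s[j+1]'(by omega) :=
    PySem.List.sorted_id_getElem_mono l (by omega) (by omega)
  have m2 : s[j+1]'(by omega) ≤ s[j+2]'(by omega) :=
    PySem.List.sorted_id_getElem_mono l (by omega) (by omega)
  have m3 : s[j+2]'(by omega) ≤ s[j+3]'(by omega) :=
    PySem.List.sorted_id_getElem_mono l (by omega) (by omega)
  have e1 : s[j+1]'(by omega) = x := by omega
  have e2 : s[j+2]'(by omega) = x := by omega
  have e3 : s[j+3]'(by omega) = x := by omega
  have hdrop : s.drop j = x :: x :: x :: x :: s.drop (j+4) := by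
    rw [List.drop_eq_getElem_cons (by omega), List.drop_eq_getElem_cons (by omega),
      List.drop_eq_getElem_cons (by omega), List.drop_eq_getElem_cons (by omega)]
    simp [e1, e2, e3, ← hx]
  have hc : 4 ≤ List.count x s := by
    have hle : List.count x (s.drop j) ≤ List.count x s :=
      (List.drop_sublist j s).count_le x
    rw [hdrop] at hle
    simp at hle
    omega
  have hcl : List.count x l = List.count x s := ((PySem.List.sorted_perm l _ _).count_eq x).symm
  refine ⟨x, ?_, by omega⟩
  rw [← PySem.List.mem_sorted l (fun x => x) false, ← hs]
  exact List.getElem_mem _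

-- backward: count ≥ 4 yields a witness window in the sorted list
theorem pv_count_to_window (l : List Int) (x : Int) (hx : 4 ≤ List.count x l) :
    ∃ j : ℕ, ∃ h : j + 3 < (PySem.List.sorted l (fun x => x) false).length,
      (PySem.List.sorted l (fun x => x) false)[j]'(Nat.lt_of_le_of_lt (Nat.le_add_right j 3) h) =
      (PySem.List.sorted l (fun x => x) false)[j + 3]'h := by
  have hd := pv_sorted_decomp l x
  set u := PySem.List.sorted (l.filter (fun y => y < x)) (fun x => x) false with hu
  set v := PySem.List.sorted (l.filter (fun y => x < y)) (fun x => x) false with hv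
  set s := PySem.List.sorted l (fun x => x) false with hs
  have hlen : s.length = u.length + l.count x + v.length := by
    rw [hd]; simp; omega
  have hget : ∀ k : ℕ, k < l.count x → ∀ hk : u.length + k < s.length, s[u.length + k]'hk = x := by
    intro k hk hks
    have : s[u.length + k]'hks
        = (u ++ List.replicate (List.count x l) x ++ v)[u.length + k]'(by rw [← hd]; exact hks) := by
      congr 1
    rw [this, List.getElem_append_left (by simp; omega), List.getElem_append_right (by omega)]
    simp
  refine ⟨u.length, by omega, ?_⟩
  rw [hget 3 (by omega) (by omega)]
  simpa using hget 0 (by omega) (by omega)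

-- the two flags agree
theorem pv_flag_eq (l : List Int) :
    ((PySem.List.pyRange 0 (((PySem.List.sorted l (fun x => x) false).length : Int) - 3) 1).any
       (fun j => PySem.List.pyGetD (PySem.List.sorted l (fun x => x) false) j 0
              == PySem.List.pyGetD (PySem.List.sorted l (fun x => x) false) (j + 3) 0))
    = l.any (fun i => 4 ≤ PySem.List.count l i) := by
  rw [Bool.eq_iff_iff]
  simp only [List.any_eq_true, PySem.List.mem_pyRange_one, decide_eq_true_eq, beq_iff_eq,
    PySem.List.count_eq]
  constructor
  · rintro ⟨j, ⟨hj0, hj1⟩, he⟩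
    have hlen : j + 3 < ((PySem.List.sorted l (fun x => x) false).length : Int) := by omega
    rw [PySem.List.pyGetD_eq_getElem _ _ hj0 (by omega),
      PySem.List.pyGetD_eq_getElem _ _ (by omega) hlen] at he
    have h34 : (j + 3).toNat = j.toNat + 3 := by omega
    refine pv_window_to_count l j.toNat (by omega) ?_
    simpa only [h34] using he
  · rintro ⟨x, hx, hc⟩
    obtain ⟨j, h, he⟩ := pv_count_to_window l x hc
    refine ⟨(j : Int), ⟨by omega, by omega⟩, ?_⟩
    rw [PySem.List.pyGetD_eq_getElem _ _ (by omega) (by omega),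
      PySem.List.pyGetD_eq_getElem _ _ (by omega) (by omega)]
    simpa only [show ((j : Int)).toNat = j by omega,
      show ((j : Int) + 3).toNat = j + 3 by omega] using he

-- ===== VERDICT (by name: the statement is the Claim_ definition above) =====
theorem calcula_pontos_quadra_spec : Claim_equal_calcula_pontos_quadra := by
  intro l _
  unfold Spec_calcula_pontos_quadra calcula_pontos_quadra calcula_pontos_quadra_alt
  simp only [pv_loopA, pv_flag_eq, Bool.false_or, zero_add]
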